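-- pv_equiv track=rewrite | github.com/Sasikala-codingal/Python | mirror.py | mirror_chars
-- ===== SOURCE A (Python) =====
-- def mirror_chars(s):
--     original = 'abcdefghijklmnopqrstuvwxyz'
--     reverse = 'zyxwvutsrqponmlkjihgfedcba'
--     mirror_map = dict(zip(original, reverse)) # Create the mirror lookup dictionary
--
--     mirrored_string = ""
--     for char in s:
--         # Use .get() to handle characters not in the map (e.g., spaces, numbers)
--         mirrored_string += mirror_map.get(char, char)
--
--     return mirrored_string
-- ===== SOURCE B (Python) =====
-- def mirror_chars(s):
--     # Divide and conquer: split the string in half, mirror each half recursively,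
--     # and concatenate; a string of length <= 1 is mirrored arithmetically
--     # (ord('a') + ord('z') == 219), with non-lowercase strings passed through.
--     n = len(s)
--     if n <= 1:
--         return chr(219 - ord(s)) if 'a' <= s <= 'z' else s
--     mid = n // 2
--     return mirror_chars(s[:mid]) + mirror_chars(s[mid:])
-- ===== Notes on version B (the rewrite author's own statement) =====
-- stated objective: alternative
-- what changed: Replaces the left-to-right dictionary-lookup concatenation loop with a divide-and-conquer recursion that splits the string at the midpoint, mirrors each half recursively, and handles length-<=1 strings arithmetically via chr(219 - ord(c)).
import Mathlib
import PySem

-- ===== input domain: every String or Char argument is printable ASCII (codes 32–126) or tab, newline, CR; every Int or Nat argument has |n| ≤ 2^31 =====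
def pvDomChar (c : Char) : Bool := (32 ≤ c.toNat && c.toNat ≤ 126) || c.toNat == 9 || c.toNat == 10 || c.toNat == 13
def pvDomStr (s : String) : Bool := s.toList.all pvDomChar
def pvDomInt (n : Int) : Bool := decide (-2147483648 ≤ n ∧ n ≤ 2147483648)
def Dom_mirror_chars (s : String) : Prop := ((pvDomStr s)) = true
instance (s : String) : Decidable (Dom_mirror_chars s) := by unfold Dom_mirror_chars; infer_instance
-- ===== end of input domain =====

-- B replaces A's dictionary-lookup concatenation loop with a divide-and-conquer recursion
-- (mirror each half, length<=1 strings mirrored arithmetically); an alternative of similar cost.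


-- ===== PORT A =====
-- A builds mirror_map = dict(zip(original, reverse)) and appends mirror_map.get(char, char)
-- for each char; the string accumulator is ported as a List Char built by foldl, packed at the end.
def mirror_chars (s : String) : String :=
  let original := "abcdefghijklmnopqrstuvwxyz".toList
  let reverse := "zyxwvutsrqponmlkjihgfedcba".toList
  let mirror_map := PySem.Dict.ofList (original.zip reverse)
  String.ofList (s.toList.foldl (fun acc c => acc ++ [mirror_map.getD c c]) [])

-- ===== PORT B =====
-- B: if len(s) <= 1: mirror it arithmetically (the string comparison 'a' <= s <= 'z'
-- on a length-<=1 string is false for '' and the char-range test for a single char);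
-- else mirror s[:mid] and s[mid:] recursively and concatenate. Ported over List Char.
def mirror_core (l : List Char) : List Char :=
  if l.length ≤ 1 then
    match l with
    | [] => []
    | c :: _ => if 'a' ≤ c ∧ c ≤ 'z' then [Char.ofNat (219 - c.toNat)] else [c]
  else
    let mid := l.length / 2
    mirror_core (l.take mid) ++ mirror_core (l.drop mid)
termination_by l.length
decreasing_by
  · simp only [List.length_take]; omega
  · simp only [List.length_drop]; omega

def mirror_chars_alt (s : String) : String :=
  String.ofList (mirror_core s.toList)

-- ===== PRECONDITION & SPEC =====
def Spec_mirror_chars (s : String) (out : String) : Prop := out = mirror_chars_alt s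
instance (s : String) (out : String) : Decidable (Spec_mirror_chars s out) := by unfold Spec_mirror_chars; infer_instance

-- ===== CLAIM (what is proved, stated in full; the proofs are below) =====
def Claim_equal_mirror_chars : Prop := ∀ (s : String), Dom_mirror_chars s → Spec_mirror_chars s (mirror_chars s)

-- ===== LEMMAS AND PROOFS =====

-- B's divide-and-conquer equals a pointwise map of the per-character mirror
theorem mirror_core_eq_map (l : List Char) :
    mirror_core l = l.map (fun c => if 'a' ≤ c ∧ c ≤ 'z' then Char.ofNat (219 - c.toNat) else c) := by
  fun_induction mirror_core l with
  | case1 => simp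
  | case2 c t hc ht =>
      have : t = [] := by cases t with | nil => rfl | cons a r => simp at ht
      subst this; simp [hc]
  | case3 c t hc ht =>
      have : t = [] := by cases t with | nil => rfl | cons a r => simp at ht
      subst this; simp [hc]
  | case4 l h mid ih2 ih1 =>
      rw [ih1, ih2, ← List.map_append, List.take_append_drop]

-- the two per-character functions agree on every code point below 127 (checked by computation)
set_option maxRecDepth 4000 in
theorem pv_char_key : ∀ n : Nat, n < 127 →
    (PySem.Dict.ofList ("abcdefghijklmnopqrstuvwxyz".toList.zip "zyxwvutsrqponmlkjihgfedcba".toList)).getD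
      (Char.ofNat n) (Char.ofNat n)
    = (if 'a' ≤ Char.ofNat n ∧ Char.ofNat n ≤ 'z' then Char.ofNat (219 - (Char.ofNat n).toNat)
       else Char.ofNat n) := by decide

theorem pv_char_eq (c : Char) (h : pvDomChar c = true) :
    (PySem.Dict.ofList ("abcdefghijklmnopqrstuvwxyz".toList.zip "zyxwvutsrqponmlkjihgfedcba".toList)).getD c c
    = (if 'a' ≤ c ∧ c ≤ 'z' then Char.ofNat (219 - c.toNat) else c) := by
  have hn : c.toNat < 127 := by
    simp only [pvDomChar, Bool.or_eq_true, Bool.and_eq_true, decide_eq_true_eq,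
      beq_iff_eq] at h
    omega
  have := pv_char_key c.toNat hn
  rwa [Char.ofNat_toNat] at this

-- ===== VERDICT (by name: the statement is the Claim_ definition above) =====
theorem mirror_chars_spec : Claim_equal_mirror_chars := by
  intro s hdom
  unfold Spec_mirror_chars mirror_chars mirror_chars_alt
  dsimp only
  rw [PySem.List.foldl_append_singleton_eq_map, mirror_core_eq_map]
  have hall : ∀ c ∈ s.toList, pvDomChar c = true := by
    simpa [Dom_mirror_chars, pvDomStr, List.all_eq_true] using hdom
  simp only [List.nil_append]
  congr 1
  exact List.map_congr_left (fun c hc => pv_char_eq c (hall c hc))
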